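-- pv_equiv track=rewrite | github.com/mortyc126-debug/SHA-256 | frozen_core_xray.py | get_frozen_free
-- ===== SOURCE A (Python) =====
-- def get_frozen_free(clauses, n, solutions):
--     """Classify variables as frozen (same in all sols) or free."""
--     frozen = set()
--     free = set()
--     for v in range(n):
--         vals = set(s[v] for s in solutions)
--         if len(vals) == 1:
--             frozen.add(v)
--         else:
--             free.add(v)
--     return frozen, free
-- ===== SOURCE B (Python) =====
-- def get_frozen_free(clauses, n, solutions):
--     """Classify variables as frozen (same in all sols) or free."""
--     if not solutions:
--         return set(), set(range(n))
--     ref = solutions[0]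
--     frozen = list(range(n))
--     for s in solutions[1:]:
--         frozen = [v for v in frozen if s[v] == ref[v]]
--     fset = set(frozen)
--     free = set(v for v in range(n) if v not in fset)
--     return fset, free
-- ===== Notes on version B (the rewrite author's own statement) =====
-- stated objective: alternative
-- what changed: Instead of building a per-variable set of column values and testing its cardinality, B takes the first solution as a reference and progressively filters a shrinking candidate list of frozen variables across the remaining solutions (inverted loop nesting, no per-column value sets), deriving free as the complement.
import Mathlib
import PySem

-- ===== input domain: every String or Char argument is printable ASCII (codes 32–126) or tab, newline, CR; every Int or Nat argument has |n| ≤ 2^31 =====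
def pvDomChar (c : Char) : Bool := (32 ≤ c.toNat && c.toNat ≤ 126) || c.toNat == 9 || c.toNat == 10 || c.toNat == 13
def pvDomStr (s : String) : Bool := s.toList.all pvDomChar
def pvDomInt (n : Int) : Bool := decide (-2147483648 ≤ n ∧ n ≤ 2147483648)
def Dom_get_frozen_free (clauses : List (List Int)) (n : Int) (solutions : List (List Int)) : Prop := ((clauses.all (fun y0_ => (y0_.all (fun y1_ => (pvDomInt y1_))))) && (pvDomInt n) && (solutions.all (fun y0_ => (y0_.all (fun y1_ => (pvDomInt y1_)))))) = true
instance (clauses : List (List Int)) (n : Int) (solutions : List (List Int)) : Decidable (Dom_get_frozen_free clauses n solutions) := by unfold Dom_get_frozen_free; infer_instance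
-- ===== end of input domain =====

-- B replaces A's per-variable value-set cardinality test by progressive filtering of a
-- candidate frozen list against a reference solution (inverted loop nesting); alternative, same cost.

-- ===== PORT A =====
-- s[v] is ported as (pyGet? s v).getD 0; Pre_ excludes the inputs where Python would raise IndexError.
def get_frozen_free (clauses : List (List Int)) (n : Int) (solutions : List (List Int)) : List Int × List Int :=
  (PySem.List.pyRange 0 n 1).foldl
    (fun (st : PySem.Set Int × PySem.Set Int) v =>
      if PySem.Set.len (PySem.Set.ofList (solutions.map (fun s => (PySem.List.pyGet? s v).getD 0))) == 1
      then (PySem.Set.add st.1 v, st.2)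
      else (st.1, PySem.Set.add st.2 v))
    (PySem.Set.empty, PySem.Set.empty)

-- ===== PORT B =====
def get_frozen_free_alt (clauses : List (List Int)) (n : Int) (solutions : List (List Int)) : List Int × List Int :=
  match solutions with
  | [] => (PySem.Set.empty, PySem.Set.ofList (PySem.List.pyRange 0 n 1))
  | ref :: rest =>
    -- frozen = the progressively filtered candidate list; fset = set(frozen); free = its complement in range(n)
    (PySem.Set.ofList
      (rest.foldl
        (fun fr s => fr.filter (fun v => (PySem.List.pyGet? s v).getD 0 == (PySem.List.pyGet? ref v).getD 0))
        (PySem.List.pyRange 0 n 1)),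
     PySem.Set.ofList ((PySem.List.pyRange 0 n 1).filter (fun v =>
       !(PySem.Set.contains (PySem.Set.ofList
          (rest.foldl
            (fun fr s => fr.filter (fun v => (PySem.List.pyGet? s v).getD 0 == (PySem.List.pyGet? ref v).getD 0))
            (PySem.List.pyRange 0 n 1))) v))))

-- ===== PRECONDITION & SPEC =====
-- Pre_ excludes exactly the inputs where Python A raises IndexError: n > 0 and some solution shorter than n.
def Pre_get_frozen_free (clauses : List (List Int)) (n : Int) (solutions : List (List Int)) : Prop :=
  n ≤ 0 ∨ ∀ s ∈ solutions, n ≤ (s.length : Int)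
instance (clauses : List (List Int)) (n : Int) (solutions : List (List Int)) : Decidable (Pre_get_frozen_free clauses n solutions) := by unfold Pre_get_frozen_free; infer_instance

def pvWitness_get_frozen_free : List (List Int) × Int × List (List Int) := ([], 2, [[0, 1], [0, 0]])

def Spec_get_frozen_free (clauses : List (List Int)) (n : Int) (solutions : List (List Int)) (out : List Int × List Int) : Prop := out = get_frozen_free_alt clauses n solutions
instance (clauses : List (List Int)) (n : Int) (solutions : List (List Int)) (out : List Int × List Int) : Decidable (Spec_get_frozen_free clauses n solutions out) := by unfold Spec_get_frozen_free; infer_instance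

-- ===== CLAIM (what is proved, stated in full; the proofs are below) =====
def Claim_equal_get_frozen_free : Prop := ∀ (clauses : List (List Int)) (n : Int) (solutions : List (List Int)), Dom_get_frozen_free clauses n solutions → Pre_get_frozen_free clauses n solutions → Spec_get_frozen_free clauses n solutions (get_frozen_free clauses n solutions)

-- ===== LEMMAS AND PROOFS =====

-- A's loop with two append-only set accumulators partitions the (nodup) range by the test.
theorem pvFoldA (P : Int → Bool) (l : List Int) (a b : List Int)
    (hl : l.Nodup) (ha : ∀ v ∈ l, v ∉ a) (hb : ∀ v ∈ l, v ∉ b) :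
    l.foldl (fun (st : PySem.Set Int × PySem.Set Int) v =>
        if P v then (PySem.Set.add st.1 v, st.2) else (st.1, PySem.Set.add st.2 v)) (a, b)
      = (a ++ l.filter P, b ++ l.filter (fun v => !P v)) := by
  induction l generalizing a b with
  | nil => simp
  | cons x t ih =>
    have hxa : x ∉ a := ha x (by simp)
    have hxb : x ∉ b := hb x (by simp)
    have hnd := List.nodup_cons.mp hl
    have hadd_a : PySem.Set.add a x = a ++ [x] := by
      simp [PySem.Set.add, PySem.Set.contains, hxa]
    have hadd_b : PySem.Set.add b x = b ++ [x] := by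
      simp [PySem.Set.add, PySem.Set.contains, hxb]
    by_cases hP : P x = true
    · have hrec := ih (a ++ [x]) b hnd.2
        (fun v hv => by
          simp only [List.mem_append, List.mem_singleton]
          rintro (h | rfl)
          · exact ha v (by simp [hv]) h
          · exact hnd.1 hv)
        (fun v hv => hb v (by simp [hv]))
      rw [List.foldl_cons]
      simp only [hP, if_true, hadd_a]
      rw [hrec]
      simp [hP]
    · have hP' : P x = false := by simpa using hP
      have hrec := ih a (b ++ [x]) hnd.2
        (fun v hv => ha v (by simp [hv]))
        (fun v hv => by
          simp only [List.mem_append, List.mem_singleton]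
          rintro (h | rfl)
          · exact hb v (by simp [hv]) h
          · exact hnd.1 hv)
      rw [List.foldl_cons]
      simp only [hP', if_false, Bool.false_eq_true, hadd_b]
      rw [hrec]
      simp [hP']

-- B's loop: repeated filtering is one filter by the conjunction over the remaining solutions.
theorem pvFoldB {α : Type} (q : α → Int → Bool) (rest : List α) (init : List Int) :
    rest.foldl (fun fr s => fr.filter (q s)) init
      = init.filter (fun v => rest.all (fun s => q s v)) := by
  induction rest generalizing init with
  | nil => simp
  | cons s t ih =>
    simp only [List.foldl_cons, ih, List.filter_filter]
    apply List.filter_congr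
    intro v _
    simp [Bool.and_comm]

-- set(x :: l) is a singleton iff every element of l equals x.
theorem pvSingleton (x : Int) (l : List Int) :
    (PySem.Set.ofList (x :: l)).length = 1 ↔ ∀ y ∈ l, y = x := by
  constructor
  · intro h1
    obtain ⟨c, hc⟩ := List.length_eq_one_iff.mp h1
    intro y hy
    have hyc : y = c := by
      have : y ∈ PySem.Set.ofList (x :: l) := (PySem.Set.mem_ofList _ _).mpr (by simp [hy])
      simpa [hc] using this
    have hxc : x = c := by
      have : x ∈ PySem.Set.ofList (x :: l) := (PySem.Set.mem_ofList _ _).mpr (by simp)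
      simpa [hc] using this
    rw [hyc, hxc]
  · intro hall
    have : PySem.Set.ofList (x :: l) = [x] := by
      have : ∀ (t : List Int), (∀ y ∈ t, y = x) → t.foldl PySem.Set.add [x] = [x] := by
        intro t
        induction t with
        | nil => intro _; simp
        | cons y u ih =>
          intro h
          have hy : y = x := h y (by simp)
          have : PySem.Set.add [x] y = [x] := by
            simp [PySem.Set.add, PySem.Set.contains, hy]
          simp only [List.foldl_cons, this]
          exact ih (fun z hz => h z (by simp [hz]))
      have h0 : PySem.Set.ofList (x :: l) = l.foldl PySem.Set.add (PySem.Set.add [] x) := by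
        simp [PySem.Set.ofList_eq_foldl]
      have hax : PySem.Set.add ([] : List Int) x = [x] := by
        simp [PySem.Set.add, PySem.Set.contains]
      rw [h0, hax]
      exact this l hall
    simp [this]

-- ===== VERDICT (by name: the statement is the Claim_ definition above) =====
theorem get_frozen_free_spec : Claim_equal_get_frozen_free := by
  intro clauses n solutions _ _
  unfold Spec_get_frozen_free get_frozen_free get_frozen_free_alt
  cases solutions with
  | nil =>
    simp only [PySem.Set.empty]
    rw [pvFoldA (fun v => PySem.Set.len (PySem.Set.ofList (([] : List (List Int)).map
          (fun s => (PySem.List.pyGet? s v).getD 0))) == 1)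
        (PySem.List.pyRange 0 n 1) [] [] (PySem.List.nodup_pyRange_one 0 n) (by simp) (by simp)]
    simp [PySem.Set.len,
      PySem.Set.ofList_eq_self_of_nodup _ (PySem.List.nodup_pyRange_one 0 n)]
  | cons ref rest =>
    simp only [PySem.Set.empty]
    rw [pvFoldA _ _ _ _ (PySem.List.nodup_pyRange_one 0 n) (by simp) (by simp)]
    rw [pvFoldB]
    have hPQ : ∀ v ∈ PySem.List.pyRange 0 n 1,
        ((PySem.Set.ofList ((ref :: rest).map (fun s => (PySem.List.pyGet? s v).getD 0))).len == 1)
        = rest.all (fun s => (PySem.List.pyGet? s v).getD 0 == (PySem.List.pyGet? ref v).getD 0) := by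
      intro v _
      rw [Bool.eq_iff_iff]
      simp only [List.map_cons, PySem.Set.len, beq_iff_eq, List.all_eq_true]
      rw [show (((PySem.Set.ofList (((PySem.List.pyGet? ref v).getD 0) ::
              rest.map (fun s => (PySem.List.pyGet? s v).getD 0))).length : Int) = 1
            ↔ (PySem.Set.ofList (((PySem.List.pyGet? ref v).getD 0) ::
              rest.map (fun s => (PySem.List.pyGet? s v).getD 0))).length = 1) by omega]
      rw [pvSingleton]
      simp
    have hnodupF : ((PySem.List.pyRange 0 n 1).filter
        (fun v => rest.all (fun s => (PySem.List.pyGet? s v).getD 0 == (PySem.List.pyGet? ref v).getD 0))).Nodup :=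
      List.Nodup.filter _ (PySem.List.nodup_pyRange_one 0 n)
    have hfset : PySem.Set.ofList ((PySem.List.pyRange 0 n 1).filter
        (fun v => rest.all (fun s => (PySem.List.pyGet? s v).getD 0 == (PySem.List.pyGet? ref v).getD 0)))
        = (PySem.List.pyRange 0 n 1).filter
            (fun v => rest.all (fun s => (PySem.List.pyGet? s v).getD 0 == (PySem.List.pyGet? ref v).getD 0)) :=
      PySem.Set.ofList_eq_self_of_nodup _ hnodupF
    refine Prod.ext ?_ ?_
    · exact (List.filter_congr hPQ).trans hfset.symm
    · have hcont : ∀ v ∈ PySem.List.pyRange 0 n 1,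
          (!(PySem.Set.contains (PySem.Set.ofList ((PySem.List.pyRange 0 n 1).filter
              (fun v => rest.all (fun s => (PySem.List.pyGet? s v).getD 0 == (PySem.List.pyGet? ref v).getD 0)))) v))
          = (!(rest.all (fun s => (PySem.List.pyGet? s v).getD 0 == (PySem.List.pyGet? ref v).getD 0))) := by
        intro v hv
        rw [hfset, Bool.eq_iff_iff]
        simp [PySem.Set.contains, List.mem_filter, hv]
      have hnP : ∀ v ∈ PySem.List.pyRange 0 n 1,
          (!((PySem.Set.ofList ((ref :: rest).map (fun s => (PySem.List.pyGet? s v).getD 0))).len == 1))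
          = (!(rest.all (fun s => (PySem.List.pyGet? s v).getD 0 == (PySem.List.pyGet? ref v).getD 0))) := by
        intro v hv
        rw [hPQ v hv]
      exact (List.filter_congr hnP).trans
        ((congrArg PySem.Set.ofList (List.filter_congr hcont)).trans
          (PySem.Set.ofList_eq_self_of_nodup _ (List.Nodup.filter _ (PySem.List.nodup_pyRange_one 0 n)))).symm
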